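-- pv_equiv track=rewrite | github.com/yeohkj/DiscordBot | main.py | map_age_group
-- ===== SOURCE A (Python) =====
-- def map_age_group(age):
--
--     age_groups = {
--         '0-19': ['0-4', '5-9', '10-14', '15-19'],
--         '20-39': ['20-24', '25-29', '30-34', '35-39'],
--         '40-59': ['40-44', '45-49', '50-54', '55-59'],
--         '60+': ['60-64', '65-69', '70-74', '75-79', '80-84', '85+']
--     }
--     for group, values in age_groups.items():
--         if age in values:
--             return group
--     return None
-- ===== SOURCE B (Python) =====
-- _FLAT = {b: g
--          for g, brackets in (
--              ('0-19', ('0-4', '5-9', '10-14', '15-19')),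
--              ('20-39', ('20-24', '25-29', '30-34', '35-39')),
--              ('40-59', ('40-44', '45-49', '50-54', '55-59')),
--              ('60+', ('60-64', '65-69', '70-74', '75-79', '80-84', '85+')))
--          for b in brackets}
--
-- def map_age_group(age):
--     return _FLAT.get(age)
-- ===== Notes on version B (the rewrite author's own statement) =====
-- stated objective: idiomatic
-- what changed: Replaced the loop over groups with list-membership tests by a single precomputed inverted dictionary mapping each bracket directly to its group, so the lookup is one dict.get with no loop or branch.
import Mathlib
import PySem

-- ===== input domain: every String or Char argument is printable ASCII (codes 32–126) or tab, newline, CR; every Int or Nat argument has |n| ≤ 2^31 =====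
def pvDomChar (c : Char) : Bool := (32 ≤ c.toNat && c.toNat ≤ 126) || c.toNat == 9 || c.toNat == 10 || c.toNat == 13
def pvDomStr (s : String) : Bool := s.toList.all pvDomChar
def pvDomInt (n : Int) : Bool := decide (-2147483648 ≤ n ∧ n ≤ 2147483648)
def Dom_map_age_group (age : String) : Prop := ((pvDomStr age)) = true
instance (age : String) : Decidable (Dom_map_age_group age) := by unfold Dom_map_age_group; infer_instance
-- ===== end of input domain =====

-- B replaces A's scan over groups with membership tests by one precomputed inverted
-- dictionary (bracket → group) looked up directly (idiomatic).

-- ===== PORT A =====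
-- the dict literal of A, as an insertion-ordered association list
def mapAgeGroups : List (String × List String) :=
  [("0-19", ["0-4", "5-9", "10-14", "15-19"]),
   ("20-39", ["20-24", "25-29", "30-34", "35-39"]),
   ("40-59", ["40-44", "45-49", "50-54", "55-59"]),
   ("60+", ["60-64", "65-69", "70-74", "75-79", "80-84", "85+"])]

-- the 'for group, values in age_groups.items(): if age in values: return group' loop
def mapAgeLoop (age : String) : List (String × List String) → Option String
  | [] => none
  | (group, values) :: rest =>
      if values.contains age then some group else mapAgeLoop age rest

def map_age_group (age : String) : Option String :=
  mapAgeLoop age mapAgeGroups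

-- ===== PORT B =====
-- the flat inverted dict built once in Source B
def mapAgeFlat : PySem.Dict String String :=
  PySem.Dict.ofList
    [("0-4", "0-19"), ("5-9", "0-19"), ("10-14", "0-19"), ("15-19", "0-19"),
     ("20-24", "20-39"), ("25-29", "20-39"), ("30-34", "20-39"), ("35-39", "20-39"),
     ("40-44", "40-59"), ("45-49", "40-59"), ("50-54", "40-59"), ("55-59", "40-59"),
     ("60-64", "60+"), ("65-69", "60+"), ("70-74", "60+"), ("75-79", "60+"),
     ("80-84", "60+"), ("85+", "60+")]

def map_age_group_alt (age : String) : Option String :=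
  mapAgeFlat.get? age

-- ===== PRECONDITION & SPEC =====
def Spec_map_age_group (age : String) (out : Option String) : Prop := out = map_age_group_alt age
instance (age : String) (out : Option String) : Decidable (Spec_map_age_group age out) := by unfold Spec_map_age_group; infer_instance

-- ===== CLAIM (what is proved, stated in full; the proofs are below) =====
def Claim_equal_map_age_group : Prop := ∀ (age : String), Dom_map_age_group age → Spec_map_age_group age (map_age_group age)

-- ===== LEMMAS AND PROOFS =====
theorem mapAgeFlat_mk : mapAgeFlat = PySem.Dict.mk
    [("0-4", "0-19"), ("5-9", "0-19"), ("10-14", "0-19"), ("15-19", "0-19"),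
     ("20-24", "20-39"), ("25-29", "20-39"), ("30-34", "20-39"), ("35-39", "20-39"),
     ("40-44", "40-59"), ("45-49", "40-59"), ("50-54", "40-59"), ("55-59", "40-59"),
     ("60-64", "60+"), ("65-69", "60+"), ("70-74", "60+"), ("75-79", "60+"),
     ("80-84", "60+"), ("85+", "60+")] := by decide

theorem map_age_eq (age : String) : map_age_group age = map_age_group_alt age := by
  by_cases h : age ∈ ["0-4", "5-9", "10-14", "15-19", "20-24", "25-29", "30-34", "35-39",
      "40-44", "45-49", "50-54", "55-59", "60-64", "65-69", "70-74", "75-79", "80-84", "85+"]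
  · simp only [List.mem_cons, List.not_mem_nil, or_false] at h
    rcases h with h | h | h | h | h | h | h | h | h | h | h | h | h | h | h | h | h | h <;>
      subst h <;> decide
  · simp only [List.mem_cons, List.not_mem_nil, or_false, not_or] at h
    obtain ⟨h1, h2, h3, h4, h5, h6, h7, h8, h9, h10, h11, h12, h13, h14, h15, h16, h17, h18⟩ := h
    simp only [map_age_group, map_age_group_alt, mapAgeFlat_mk, mapAgeGroups, mapAgeLoop,
      PySem.Dict.get?_mk_cons, List.contains_cons, List.contains_nil,
      Bool.or_eq_true, beq_iff_eq, Bool.or_false]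
    simp_all [PySem.Dict.get?, eq_comm]

-- ===== VERDICT (by name: the statement is the Claim_ definition above) =====
theorem map_age_group_spec : Claim_equal_map_age_group := by
  intro age _
  exact map_age_eq age
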